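-- pv_equiv track=rewrite | github.com/sklam/numba | minibench/bench_basic.py | sum2d
-- ===== SOURCE A (Python) =====
-- def sum2d(n):
--     c = 0
--     for i in range(n):
--         for j in range(i):
--             c += i + j
--     for i in range(n):
--         for j in range(i):
--             c += i + j
--
--     return c
-- ===== SOURCE B (Python) =====
-- def sum2d(n):
--     # closed form: the doubled triangular double-sum equals n*(n-1)^2 for n > 0
--     return n * (n - 1) ** 2 if n > 0 else 0
-- ===== Notes on version B (the rewrite author's own statement) =====
-- stated objective: faster
-- what changed: Replaces the two quadratic nested loops with the closed-form arithmetic formula n*(n-1)^2 (0 for n<=0).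
import Mathlib
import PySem

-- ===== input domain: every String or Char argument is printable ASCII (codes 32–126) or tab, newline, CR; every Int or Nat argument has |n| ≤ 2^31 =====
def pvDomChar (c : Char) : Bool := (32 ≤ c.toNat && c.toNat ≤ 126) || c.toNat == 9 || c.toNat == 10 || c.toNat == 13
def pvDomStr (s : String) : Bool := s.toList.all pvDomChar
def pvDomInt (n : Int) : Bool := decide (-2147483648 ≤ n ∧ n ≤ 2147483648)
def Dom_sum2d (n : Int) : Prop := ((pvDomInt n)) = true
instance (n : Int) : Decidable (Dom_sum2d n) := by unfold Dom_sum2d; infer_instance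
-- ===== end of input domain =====

-- B replaces A's two quadratic nested loops with the closed-form formula n*(n-1)^2 (0 for n ≤ 0): asymptotically faster.

-- ===== PORT A =====
def sum2d (n : Int) : Int :=
  let c : Int := 0
  let c := (PySem.List.pyRange 0 n 1).foldl
    (fun c i => (PySem.List.pyRange 0 i 1).foldl (fun c j => c + (i + j)) c) c
  let c := (PySem.List.pyRange 0 n 1).foldl
    (fun c i => (PySem.List.pyRange 0 i 1).foldl (fun c j => c + (i + j)) c) c
  c

-- ===== PORT B =====
def sum2d_alt (n : Int) : Int :=
  if 0 < n then n * (n - 1) ^ 2 else 0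

-- ===== PRECONDITION & SPEC =====
def Spec_sum2d (n : Int) (out : Int) : Prop := out = sum2d_alt n
instance (n : Int) (out : Int) : Decidable (Spec_sum2d n out) := by unfold Spec_sum2d; infer_instance

-- ===== CLAIM (what is proved, stated in full; the proofs are below) =====
def Claim_equal_sum2d : Prop := ∀ (n : Int), Dom_sum2d n → Spec_sum2d n (sum2d n)

-- ===== LEMMAS AND PROOFS =====

-- one pass of A's loop, as a sum
def passSum (n : Int) : Int :=
  ((PySem.List.pyRange 0 n 1).map
    (fun i => ((PySem.List.pyRange 0 i 1).map (fun j => i + j)).sum)).sum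

lemma pass_eq (n : Int) (c : Int) :
    (PySem.List.pyRange 0 n 1).foldl
      (fun c i => (PySem.List.pyRange 0 i 1).foldl (fun c j => c + (i + j)) c) c
    = c + passSum n := by
  have h : ∀ (l : List Int) (c : Int),
      l.foldl (fun c i => (PySem.List.pyRange 0 i 1).foldl (fun c j => c + (i + j)) c) c
      = c + (l.map (fun i => ((PySem.List.pyRange 0 i 1).map (fun j => i + j)).sum)).sum := by
    intro l
    induction l with
    | nil => intro c; simp
    | cons a l ih =>
      intro c
      simp only [List.foldl_cons, List.map_cons, List.sum_cons,
        PySem.List.foldl_add]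
      ring
  simpa [passSum] using h _ c

lemma range_sum_gen (a : Int) (m : Nat) :
    2 * ((PySem.List.pyRange 0 (m : Int) 1).map (fun j => a + j)).sum
      = 2 * a * m + m * (m - 1) := by
  induction m with
  | zero => simp [PySem.List.pyRange_one_eq_nil]
  | succ k ih =>
    have hsplit : PySem.List.pyRange 0 ((k : Int) + 1) 1
        = PySem.List.pyRange 0 (k : Int) 1 ++ [(k : Int)] :=
      PySem.List.pyRange_one_succ_right (by exact_mod_cast Nat.zero_le k)
    push_cast [hsplit, List.map_append, List.sum_append, List.map_cons,
      List.sum_cons, List.map_nil, List.sum_nil]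
    nlinarith [ih]

lemma range_sum_two_mul (m : Nat) :
    2 * ((PySem.List.pyRange 0 (m : Int) 1).map (fun j => (m : Int) + j)).sum
      = 3 * (m : Int) * m - m := by
  have := range_sum_gen (m : Int) m
  linarith [this]

lemma passSum_two_mul (m : Nat) :
    2 * passSum (m : Int) = (m : Int) * (m - 1) * (m - 1) := by
  induction m with
  | zero => simp [passSum, PySem.List.pyRange_one_eq_nil]
  | succ k ih =>
    have hsplit : PySem.List.pyRange 0 ((k : Int) + 1) 1
        = PySem.List.pyRange 0 (k : Int) 1 ++ [(k : Int)] :=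
      PySem.List.pyRange_one_succ_right (by exact_mod_cast Nat.zero_le k)
    have hinner := range_sum_two_mul k
    simp only [passSum, Nat.cast_succ, hsplit, List.map_append, List.sum_append,
      List.map_cons, List.map_nil, List.sum_cons, List.sum_nil] at *
    nlinarith [ih, hinner]

-- ===== VERDICT (by name: the statement is the Claim_ definition above) =====
theorem sum2d_spec : Claim_equal_sum2d := by
  intro n _
  unfold Spec_sum2d sum2d sum2d_alt
  simp only [pass_eq, zero_add]
  by_cases hn : 0 < n
  · have hm : n = ((n.toNat : Nat) : Int) := by omega
    have := passSum_two_mul n.toNat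
    rw [← hm] at this
    simp only [if_pos hn]
    nlinarith [this]
  · have : PySem.List.pyRange 0 n 1 = [] := PySem.List.pyRange_one_eq_nil (by omega)
    simp [passSum, this, if_neg hn]
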